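-- pv_equiv track=rewrite | github.com/jdahm/gt4py | src/gt4py/backend/gt_backends.py | make_x86_layout_map
-- ===== SOURCE A (Python) =====
-- from typing import (
--     TYPE_CHECKING,
--     Any,
--     Dict,
--     Generator,
--     List,
--     Optional,
--     OrderedDict,
--     Sequence,
--     Set,
--     Tuple,
--     Type,
--     Union,
-- )
--
-- def make_x86_layout_map(mask: Tuple[int, ...]) -> Tuple[Optional[int], ...]:
--     ctr = iter(range(sum(mask)))
--     if len(mask) < 3:
--         layout: List[Optional[int]] = [next(ctr) if m else None for m in mask]
--     else:
--         swapped_mask: List[Optional[int]] = [*mask[3:], *mask[:3]]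
--         layout = [next(ctr) if m else None for m in swapped_mask]
--
--         layout = [*layout[-3:], *layout[:-3]]
--
--     return tuple(layout)
-- ===== SOURCE B (Python) =====
-- def make_x86_layout_map(mask):
--     n = len(mask)
--     t = [0] * (n + 1)
--     for i, m in enumerate(mask):
--         t[i + 1] = t[i] + (1 if m else 0)
--     cut = 3 if n >= 3 else 0
--     tail = t[n] - t[cut]
--     return tuple(
--         ((t[i] - t[cut]) if i >= cut else (tail + t[i])) if mask[i] else None
--         for i in range(n)
--     )
-- ===== Notes on version B (the rewrite author's own statement) =====
-- stated objective: alternative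
-- what changed: A numbers truthy slots sequentially by consuming an iterator along a rotated copy of the mask and rotating the result back; B never rotates or counts sequentially: it builds a prefix-sum table of truthy counts once and computes each slot's rank by a closed-form difference of two table entries (t[i]-t[cut] past the cut, tail+t[i] before it).
-- crash fix: On masks whose number of truthy entries exceeds sum(mask) (only possible with negative or >1 entries), A raises StopIteration; B returns the layout ranking truthy positions in rotated order. — e.g. on make_x86_layout_map([-1]): A raises StopIteration, B returns [some 0]
import Mathlib
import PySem

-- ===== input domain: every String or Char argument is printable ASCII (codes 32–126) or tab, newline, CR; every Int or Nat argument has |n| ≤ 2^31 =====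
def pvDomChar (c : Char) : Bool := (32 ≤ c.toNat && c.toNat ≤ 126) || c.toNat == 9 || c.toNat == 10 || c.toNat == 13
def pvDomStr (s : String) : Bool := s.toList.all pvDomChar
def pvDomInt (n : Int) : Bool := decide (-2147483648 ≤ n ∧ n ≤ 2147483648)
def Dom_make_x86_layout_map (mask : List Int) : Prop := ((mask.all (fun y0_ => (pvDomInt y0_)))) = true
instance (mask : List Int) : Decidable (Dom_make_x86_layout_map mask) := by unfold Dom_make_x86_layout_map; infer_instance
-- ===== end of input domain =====

-- B replaces A's rotate/fill/unrotate sequential numbering by a prefix-sum table of truthy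
-- counts plus a closed-form rank per index; same cost, genuinely different algorithm.

-- ===== PORT A =====
-- next(ctr) on ctr = iter(range(bound)): yields k while k < bound; an exhausted iterator
-- raises StopIteration in Python — that case is excluded by Pre_ (none is never produced there).
def pvAIter (bound : Int) : List Int → Int → List (Option Int)
  | [], _ => []
  | m :: ms, k =>
    if m ≠ 0 then (if k < bound then some k else none) :: pvAIter bound ms (k + 1)
    else none :: pvAIter bound ms k

def make_x86_layout_map (mask : List Int) : List (Option Int) :=
  let bound := mask.sum                                   -- ctr = iter(range(sum(mask)))
  if mask.length < 3 then
    pvAIter bound mask 0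
  else
    let swapped := PySem.List.slice mask (some 3) none ++ PySem.List.slice mask none (some 3)
    let layout := pvAIter bound swapped 0
    PySem.List.slice layout (some (-3)) none ++ PySem.List.slice layout none (some (-3))

-- ===== PORT B =====
-- the prefix-sum loop 't[i+1] = t[i] + (1 if m else 0)' as a structural recursion carrying t[i]
def pvPrefix : List Int → Int → List Int
  | [], c => [c]
  | m :: ms, c => c :: pvPrefix ms (c + (if m ≠ 0 then 1 else 0))

def make_x86_layout_map_alt (mask : List Int) : List (Option Int) :=
  let n := mask.length
  let t := pvPrefix mask 0
  let cut := if 3 ≤ n then 3 else 0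
  let tail := t.getD n 0 - t.getD cut 0
  (List.range n).map (fun i =>
    if mask.getD i 0 ≠ 0 then
      some (if cut ≤ i then t.getD i 0 - t.getD cut 0 else tail + t.getD i 0)
    else none)

-- ===== PRECONDITION & SPEC =====
def pvCountNZ (l : List Int) : Int := ((l.filter (fun m => m ≠ 0)).length : Int)

-- Pre_ excludes exactly the masks on which A raises StopIteration: more truthy entries than
-- sum(mask) (only possible with negative or >1 entries).
def Pre_make_x86_layout_map (mask : List Int) : Prop := pvCountNZ mask ≤ mask.sum
instance (mask : List Int) : Decidable (Pre_make_x86_layout_map mask) := by unfold Pre_make_x86_layout_map; infer_instance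

def pvWitness_make_x86_layout_map : List Int := [1, 0, 1, 1]

-- On masks whose number of truthy entries exceeds sum(mask), A raises StopIteration; B
-- returns the layout ranking the truthy positions in rotated order.
def Raises_make_x86_layout_map (mask : List Int) : Prop := mask.sum < pvCountNZ mask
instance (mask : List Int) : Decidable (Raises_make_x86_layout_map mask) := by unfold Raises_make_x86_layout_map; infer_instance
def pvRaiseWitness_make_x86_layout_map : List Int := [-1]
def pvRaiseWitnessOut_make_x86_layout_map : List (Option Int) := [some 0]

def Spec_make_x86_layout_map (mask : List Int) (out : List (Option Int)) : Prop := out = make_x86_layout_map_alt mask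
instance (mask : List Int) (out : List (Option Int)) : Decidable (Spec_make_x86_layout_map mask out) := by unfold Spec_make_x86_layout_map; infer_instance

-- ===== CLAIM (what is proved, stated in full; the proofs are below) =====
def Claim_equal_make_x86_layout_map : Prop := ∀ (mask : List Int), Dom_make_x86_layout_map mask → Pre_make_x86_layout_map mask → Spec_make_x86_layout_map mask (make_x86_layout_map mask)
def Claim_raises_make_x86_layout_map : Prop := (∀ (mask : List Int), Dom_make_x86_layout_map mask → Raises_make_x86_layout_map mask → ¬ Pre_make_x86_layout_map mask) ∧ (Dom_make_x86_layout_map (pvRaiseWitness_make_x86_layout_map) ∧ Raises_make_x86_layout_map (pvRaiseWitness_make_x86_layout_map) ∧ make_x86_layout_map_alt (pvRaiseWitness_make_x86_layout_map) = pvRaiseWitnessOut_make_x86_layout_map)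

-- ===== LEMMAS AND PROOFS =====

-- The sequential fill A's comprehension performs once the iterator is known not to exhaust.
def pvSeqFill : List Int → Int → List (Option Int)
  | [], _ => []
  | m :: ms, c => if m ≠ 0 then some c :: pvSeqFill ms (c + 1) else none :: pvSeqFill ms c

theorem pvCountNZ_nil : pvCountNZ [] = 0 := rfl

theorem pvCountNZ_cons (m : Int) (ms : List Int) :
    pvCountNZ (m :: ms) = (if m ≠ 0 then 1 else 0) + pvCountNZ ms := by
  rcases eq_or_ne m 0 with h | h
  · subst h; simp [pvCountNZ]
  · rw [if_pos h]
    unfold pvCountNZ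
    rw [List.filter_cons, if_pos (by simpa using h)]
    push_cast [List.length_cons]
    omega

theorem pvCountNZ_nonneg (l : List Int) : 0 ≤ pvCountNZ l := Int.natCast_nonneg _

theorem pvCountNZ_append (xs ys : List Int) :
    pvCountNZ (xs ++ ys) = pvCountNZ xs + pvCountNZ ys := by
  simp [pvCountNZ, List.filter_append]

theorem pvAIter_eq_seqFill (bound : Int) (ms : List Int) (c : Int)
    (h : c + pvCountNZ ms ≤ bound) : pvAIter bound ms c = pvSeqFill ms c := by
  induction ms generalizing c with
  | nil => rfl
  | cons m rest ih =>
    have hc := pvCountNZ_cons m rest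
    have hnn := pvCountNZ_nonneg rest
    by_cases hm : m ≠ 0
    · simp only [pvAIter, pvSeqFill, if_pos hm]
      have hlt : c < bound := by rw [hc, if_pos hm] at h; omega
      rw [if_pos hlt, ih (c + 1) (by rw [hc, if_pos hm] at h; omega)]
    · simp only [pvAIter, pvSeqFill, if_neg hm]
      rw [ih c (by rw [hc, if_neg hm] at h; omega)]

theorem pvSeqFill_length (ms : List Int) (c : Int) : (pvSeqFill ms c).length = ms.length := by
  induction ms generalizing c with
  | nil => rfl
  | cons m rest ih => simp only [pvSeqFill]; split_ifs <;> simp [ih]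

theorem pvSeqFill_append (xs ys : List Int) (c : Int) :
    pvSeqFill (xs ++ ys) c = pvSeqFill xs c ++ pvSeqFill ys (c + pvCountNZ xs) := by
  induction xs generalizing c with
  | nil => simp [pvSeqFill, pvCountNZ_nil]
  | cons m rest ih =>
    rcases eq_or_ne m 0 with h | h
    · subst h
      simp [pvSeqFill, pvCountNZ_cons, ih c]
    · have e : c + 1 + pvCountNZ rest = c + (1 + pvCountNZ rest) := by omega
      simp [pvSeqFill, pvCountNZ_cons, h, ih (c + 1), e]

-- pvSeqFill in closed form: index i carries c + (truthy count strictly before i)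
theorem pvSeqFill_eq_map (xs : List Int) (c : Int) :
    pvSeqFill xs c = (List.range xs.length).map
      (fun i => if xs.getD i 0 ≠ 0 then some (c + pvCountNZ (xs.take i)) else none) := by
  induction xs generalizing c with
  | nil => rfl
  | cons m rest ih =>
    rw [List.length_cons, List.range_succ_eq_map, List.map_cons, List.map_map]
    simp only [pvSeqFill]
    by_cases hm : m ≠ 0
    · rw [if_pos hm]
      congr 1
      · simp [List.getD, hm, pvCountNZ_nil]
      · rw [ih (c + 1)]
        apply List.map_congr_left
        intro i _
        simp only [Function.comp, Nat.succ_eq_add_one, List.getD_cons_succ, List.take_succ_cons,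
          pvCountNZ_cons, if_pos hm]
        split_ifs with h
        · congr 1; ring
        · rfl
    · rw [if_neg hm]
      congr 1
      · simp [List.getD, hm]
      · rw [ih c]
        apply List.map_congr_left
        intro i _
        simp only [Function.comp, Nat.succ_eq_add_one, List.getD_cons_succ, List.take_succ_cons,
          pvCountNZ_cons, if_neg hm]
        split_ifs with h
        · congr 1; ring
        · rfl

theorem pvPrefix_getD (ms : List Int) (c : Int) (i : Nat) (h : i ≤ ms.length) :
    (pvPrefix ms c).getD i 0 = c + pvCountNZ (ms.take i) := by
  induction ms generalizing c i with
  | nil =>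
    have h0 : i = 0 := by simpa using h
    subst h0
    simp [pvPrefix, pvCountNZ_nil]
  | cons m rest ih =>
    cases i with
    | zero => simp [pvPrefix, pvCountNZ_nil]
    | succ j =>
      simp only [pvPrefix, List.getD_cons_succ, List.take_succ_cons, pvCountNZ_cons]
      rw [ih _ j (by simpa using h)]
      split_ifs <;> ring

-- ===== VERDICT (by name: the statement is the Claim_ definition above) =====
theorem make_x86_layout_map_spec : Claim_equal_make_x86_layout_map := by
  unfold Claim_equal_make_x86_layout_map
  intro mask _ hpre
  simp only [Spec_make_x86_layout_map, make_x86_layout_map, make_x86_layout_map_alt]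
  unfold Pre_make_x86_layout_map at hpre
  by_cases h3 : mask.length < 3
  · rw [if_pos h3, if_neg (by omega)]
    rw [pvAIter_eq_seqFill _ _ _ (by simpa using hpre), pvSeqFill_eq_map]
    apply List.map_congr_left
    intro i hi
    have hi' : i < mask.length := List.mem_range.mp hi
    have ht0 : (pvPrefix mask 0).getD 0 0 = 0 := by
      rw [pvPrefix_getD _ _ 0 (by omega)]; simp [pvCountNZ_nil]
    have hti : (pvPrefix mask 0).getD i 0 = pvCountNZ (mask.take i) := by
      rw [pvPrefix_getD _ _ i (by omega)]; ring
    simp only [ht0, hti, Nat.zero_le, if_pos, zero_add]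
    split_ifs <;> simp
  · rw [if_neg h3, if_pos (by omega)]
    have hn : 3 ≤ mask.length := by omega
    rw [PySem.List.slice_from _ (show (0:Int) ≤ 3 by norm_num),
        PySem.List.slice_to _ (show (0:Int) ≤ 3 by norm_num)]
    have ht3 : (3 : Int).toNat = 3 := rfl
    rw [ht3]
    have hcut : pvCountNZ mask = pvCountNZ (mask.take 3) + pvCountNZ (mask.drop 3) := by
      conv_lhs => rw [← List.take_append_drop 3 mask]
      exact pvCountNZ_append _ _
    have hswcnt : pvCountNZ (mask.drop 3 ++ mask.take 3) = pvCountNZ mask := by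
      rw [pvCountNZ_append]; omega
    rw [pvAIter_eq_seqFill _ _ _ (by rw [hswcnt]; omega), pvSeqFill_append]
    have hlen3 : (mask.take 3).length = 3 := by simp; omega
    have hlend : (mask.drop 3).length = mask.length - 3 := by simp
    have hlenA : (pvSeqFill (mask.drop 3) 0).length = mask.length - 3 := by
      rw [pvSeqFill_length, hlend]
    have hlenB : (pvSeqFill (mask.take 3) (0 + pvCountNZ (mask.drop 3))).length = 3 := by
      rw [pvSeqFill_length, hlen3]
    rw [PySem.List.slice_from_neg_ofNat _ 3 (by norm_num),
        PySem.List.slice_to_neg_ofNat _ 3 (by norm_num)]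
    rw [show (pvSeqFill (mask.drop 3) 0 ++ pvSeqFill (mask.take 3) (0 + pvCountNZ (mask.drop 3))).length = mask.length from by
      rw [List.length_append, hlenA, hlenB]; omega]
    rw [show (pvSeqFill (mask.drop 3) 0 ++ pvSeqFill (mask.take 3) (0 + pvCountNZ (mask.drop 3))).drop (mask.length - 3)
        = pvSeqFill (mask.take 3) (0 + pvCountNZ (mask.drop 3)) from by rw [← hlenA, List.drop_left]]
    rw [show (pvSeqFill (mask.drop 3) 0 ++ pvSeqFill (mask.take 3) (0 + pvCountNZ (mask.drop 3))).take (mask.length - 3)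
        = pvSeqFill (mask.drop 3) 0 from by rw [← hlenA, List.take_left]]
    rw [pvSeqFill_eq_map, pvSeqFill_eq_map, hlen3, hlend]
    rw [show mask.length = 3 + (mask.length - 3) from by omega, List.range_add, List.map_append,
        List.map_map]
    rw [show 3 + (mask.length - 3) = mask.length from by omega]
    have htn : (pvPrefix mask 0).getD mask.length 0 = pvCountNZ mask := by
      rw [pvPrefix_getD _ _ _ (le_refl _)]; simp
    have ht3' : (pvPrefix mask 0).getD 3 0 = pvCountNZ (mask.take 3) := by
      rw [pvPrefix_getD _ _ 3 (by omega)]; ring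
    congr 1
    · -- first block: indices 0..2 ↔ pvSeqFill (take 3) (cnt drop3)
      apply List.map_congr_left
      intro i hi
      have hi' : i < 3 := List.mem_range.mp hi
      have hg : (mask.take 3).getD i 0 = mask.getD i 0 := by
        simp [List.getD, List.getElem?_take, if_pos hi']
      have htt : (mask.take 3).take i = mask.take i := by
        rw [List.take_take]; congr 1; omega
      have hti : (pvPrefix mask 0).getD i 0 = pvCountNZ (mask.take i) := by
        rw [pvPrefix_getD _ _ i (by omega)]; ring
      rw [hg, htt, htn, ht3', hti, if_neg (show ¬ 3 ≤ i from by omega)]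
      split_ifs with h
      · congr 1; omega
      · rfl
    · -- second block: indices 3.. ↔ pvSeqFill (drop 3) 0
      apply List.map_congr_left
      intro i hi
      have hi' : i < mask.length - 3 := List.mem_range.mp hi
      simp only [Function.comp_apply]
      have hg : mask.getD (3 + i) 0 = (mask.drop 3).getD i 0 := by
        simp [List.getD, List.getElem?_drop]
      have hti : (pvPrefix mask 0).getD (3 + i) 0
          = pvCountNZ (mask.take 3) + pvCountNZ ((mask.drop 3).take i) := by
        rw [pvPrefix_getD _ _ _ (by omega), List.take_add, pvCountNZ_append]; ring
      rw [hg, hti, ht3', if_pos (show 3 ≤ 3 + i from by omega)]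
      split_ifs with h
      · congr 1; omega
      · rfl

theorem make_x86_layout_map_raises : Claim_raises_make_x86_layout_map := by
  unfold Claim_raises_make_x86_layout_map
  constructor
  · intro mask _ hr hp
    unfold Raises_make_x86_layout_map at hr
    unfold Pre_make_x86_layout_map at hp
    omega
  · exact ⟨by decide, by decide, by decide⟩

-- witness self-check: the raise-witness facts, read off make_x86_layout_map_raises
theorem pvRaiseWitness_make_x86_layout_map_ok :
    Raises_make_x86_layout_map pvRaiseWitness_make_x86_layout_map ∧
    make_x86_layout_map_alt pvRaiseWitness_make_x86_layout_map = pvRaiseWitnessOut_make_x86_layout_map :=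
  ⟨make_x86_layout_map_raises.2.2.1, make_x86_layout_map_raises.2.2.2⟩
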